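-- pv_equiv track=rewrite | github.com/posl/comment_recommendation | script/split_gen/4_time/zh/238_B/2.py | get_max_angle
-- ===== SOURCE A (Python) =====
-- def get_max_angle(n, angles):
--     result = 0
--     for i in range(n):
--         angle = angles[i]
--         temp = angle
--         for j in range(n):
--             if j == i:
--                 continue
--             temp += angles[j]
--             temp %= 360
--         if temp > result:
--             result = temp
--     return result
-- ===== SOURCE B (Python) =====
-- def get_max_angle(n, angles):
--     if n <= 0:
--         return 0
--     return sum(angles[:n]) % 360
-- ===== Notes on version B (the rewrite author's own statement) =====
-- stated objective: faster
-- what changed: The inner accumulate-mod loop yields the same value sum(angles[:n]) % 360 for every i (and it is non-negative), so the O(n^2) double loop plus max is replaced by a single sum and one modulo.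
-- intended difference: For n == 1 with angles[0] >= 360 or angles[0] negative and not a multiple of 360, A skips the modulo entirely and returns max(angles[0], 0) unreduced, while B returns angles[0] % 360, the intended angle reduced to [0, 360). — e.g. on get_max_angle(1, [400]): A returns 400, B returns 40
import Mathlib
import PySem

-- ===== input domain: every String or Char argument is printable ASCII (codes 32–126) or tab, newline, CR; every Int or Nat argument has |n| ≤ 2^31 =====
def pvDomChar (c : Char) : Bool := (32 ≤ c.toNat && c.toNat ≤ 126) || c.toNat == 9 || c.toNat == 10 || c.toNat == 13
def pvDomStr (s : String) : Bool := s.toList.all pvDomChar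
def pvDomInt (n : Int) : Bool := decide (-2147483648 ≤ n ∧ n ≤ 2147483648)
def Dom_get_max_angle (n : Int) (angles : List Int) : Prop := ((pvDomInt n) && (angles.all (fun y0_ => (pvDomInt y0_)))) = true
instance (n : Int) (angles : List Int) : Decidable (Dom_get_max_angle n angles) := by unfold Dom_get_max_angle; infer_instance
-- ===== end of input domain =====

-- B replaces A's O(n^2) double loop by a single sum and one modulo; on the n == 1
-- corner B reduces the angle mod 360 where A returns it unreduced (see D_ below).

-- ===== PORT A =====
def get_max_angle (n : Int) (angles : List Int) : Int :=
  (PySem.List.pyRange 0 n 1).foldl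
    (fun result i =>
      let angle := PySem.List.pyGetD angles i 0
      let temp :=
        (PySem.List.pyRange 0 n 1).foldl
          (fun temp j =>
            if j = i then temp
            else PySem.Int.mod (temp + PySem.List.pyGetD angles j 0) 360)
          angle
      if temp > result then temp else result)
    0

-- ===== PORT B =====
def get_max_angle_alt (n : Int) (angles : List Int) : Int :=
  if n ≤ 0 then 0
  else PySem.Int.mod (PySem.List.slice angles none (some n)).sum 360

-- ===== PRECONDITION & SPEC =====
-- Pre_ excludes only the inputs on which A raises IndexError (some i < n out of range).
def Pre_get_max_angle (n : Int) (angles : List Int) : Prop := n ≤ (angles.length : Int)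
instance (n : Int) (angles : List Int) : Decidable (Pre_get_max_angle n angles) := by
  unfold Pre_get_max_angle; infer_instance
def pvWitness_get_max_angle : Int × List Int := (2, [10, 370])

-- For n == 1 with angles[0] ≥ 360 or angles[0] negative and not a multiple of 360, A skips
-- the modulo entirely and returns max(angles[0], 0) unreduced, while B returns
-- angles[0] % 360, the intended angle reduced to [0, 360).
def D_get_max_angle (n : Int) (angles : List Int) : Prop :=
  n = 1 ∧ (360 ≤ angles.getD 0 0 ∨
           (angles.getD 0 0 < 0 ∧ PySem.Int.mod (angles.getD 0 0) 360 ≠ 0))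
instance (n : Int) (angles : List Int) : Decidable (D_get_max_angle n angles) := by
  unfold D_get_max_angle; infer_instance

def Spec_get_max_angle (n : Int) (angles : List Int) (out : Int) : Prop :=
  ¬ D_get_max_angle n angles → out = get_max_angle_alt n angles
instance (n : Int) (angles : List Int) (out : Int) : Decidable (Spec_get_max_angle n angles out) := by
  unfold Spec_get_max_angle; infer_instance

def pvDiffWitness_get_max_angle : Int × List Int := (1, [400])
def pvDiffWitnessOut_get_max_angle : Int × Int := (400, 40)

-- ===== CLAIM (what is proved, stated in full; the proofs are below) =====
def Claim_unchanged_get_max_angle : Prop := ∀ (n : Int) (angles : List Int), Dom_get_max_angle n angles → Pre_get_max_angle n angles → Spec_get_max_angle n angles (get_max_angle n angles)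
def Claim_changed_get_max_angle : Prop := Dom_get_max_angle (pvDiffWitness_get_max_angle.1) (pvDiffWitness_get_max_angle.2) ∧ Pre_get_max_angle (pvDiffWitness_get_max_angle.1) (pvDiffWitness_get_max_angle.2) ∧ D_get_max_angle (pvDiffWitness_get_max_angle.1) (pvDiffWitness_get_max_angle.2) ∧ get_max_angle (pvDiffWitness_get_max_angle.1) (pvDiffWitness_get_max_angle.2) = pvDiffWitnessOut_get_max_angle.1 ∧ get_max_angle_alt (pvDiffWitness_get_max_angle.1) (pvDiffWitness_get_max_angle.2) = pvDiffWitnessOut_get_max_angle.2 ∧ pvDiffWitnessOut_get_max_angle.1 ≠ pvDiffWitnessOut_get_max_angle.2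
def Claim_exact_get_max_angle : Prop := ∀ (n : Int) (angles : List Int), Dom_get_max_angle n angles → Pre_get_max_angle n angles → D_get_max_angle n angles → get_max_angle n angles ≠ get_max_angle_alt n angles

-- ===== LEMMAS AND PROOFS =====

-- chain of (t + f j) % 360 steps over M, starting from an already-reduced value
lemma chainFold (f : Int → Int) : ∀ (M : List Int) (t0 : Int),
    M.foldl (fun t j => PySem.Int.mod (t + f j) 360) (PySem.Int.mod t0 360)
      = PySem.Int.mod (t0 + (M.map f).sum) 360 := by
  intro M
  induction M with
  | nil => intro t0; simp
  | cons x M ih =>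
    intro t0
    have h1 : PySem.Int.mod (PySem.Int.mod t0 360 + f x) 360
        = PySem.Int.mod (t0 + f x) 360 := by
      rw [PySem.Int.mod_eq_emod_of_pos (by norm_num),
          PySem.Int.mod_eq_emod_of_pos (by norm_num),
          PySem.Int.mod_eq_emod_of_pos (by norm_num)]
      omega
    simp only [List.foldl_cons, h1, ih (t0 + f x), List.map_cons, List.sum_cons]
    ring_nf

lemma chainFold' (f : Int → Int) (M : List Int) (hM : M ≠ []) (t0 : Int) :
    M.foldl (fun t j => PySem.Int.mod (t + f j) 360) t0
      = PySem.Int.mod (t0 + (M.map f).sum) 360 := by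
  cases M with
  | nil => exact absurd rfl hM
  | cons x M =>
    simp only [List.foldl_cons, chainFold f M (t0 + f x), List.map_cons, List.sum_cons]
    ring_nf

-- the inner j-loop of A, for 0 ≤ i < n and 2 ≤ n, computes the full sum mod 360
lemma inner_eq (angles : List Int) (n i : Int) (h2 : 2 ≤ n) (hi0 : 0 ≤ i) (hin : i < n) :
    (PySem.List.pyRange 0 n 1).foldl
        (fun temp j =>
          if j = i then temp
          else PySem.Int.mod (temp + PySem.List.pyGetD angles j 0) 360)
        (PySem.List.pyGetD angles i 0)
      = PySem.Int.mod (((PySem.List.pyRange 0 n 1).map (fun j => PySem.List.pyGetD angles j 0)).sum) 360 := by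
  have hsplit : PySem.List.pyRange 0 n 1
      = PySem.List.pyRange 0 i 1 ++ (i :: PySem.List.pyRange (i+1) n 1) := by
    rw [PySem.List.pyRange_one_append 0 i n hi0 (le_of_lt hin),
        PySem.List.pyRange_one_cons hin]
  have hpre : ∀ t0 : Int, (PySem.List.pyRange 0 i 1).foldl
      (fun temp j => if j = i then temp
        else PySem.Int.mod (temp + PySem.List.pyGetD angles j 0) 360) t0
      = (PySem.List.pyRange 0 i 1).foldl
      (fun temp j => PySem.Int.mod (temp + PySem.List.pyGetD angles j 0) 360) t0 := by
    intro t0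
    apply PySem.List.foldl_congr_mem
    intro acc x hx
    have hm := PySem.List.mem_pyRange_one.mp hx
    have hne : x ≠ i := by omega
    simp [hne]
  have hpost : ∀ t0 : Int, (PySem.List.pyRange (i+1) n 1).foldl
      (fun temp j => if j = i then temp
        else PySem.Int.mod (temp + PySem.List.pyGetD angles j 0) 360) t0
      = (PySem.List.pyRange (i+1) n 1).foldl
      (fun temp j => PySem.Int.mod (temp + PySem.List.pyGetD angles j 0) 360) t0 := by
    intro t0
    apply PySem.List.foldl_congr_mem
    intro acc x hx
    have hm := PySem.List.mem_pyRange_one.mp hx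
    have hne : x ≠ i := by omega
    simp [hne]
  rw [hsplit, List.foldl_append, List.foldl_cons, if_pos rfl, hpre, hpost]
  by_cases hpre0 : (PySem.List.pyRange 0 i 1) = []
  · have hne : PySem.List.pyRange (i+1) n 1 ≠ [] := by
      have hi0' : i = 0 := by
        by_contra hc
        have hlt : (0:Int) < i := by omega
        have hcons := PySem.List.pyRange_one_cons hlt
        rw [hpre0] at hcons
        exact List.cons_ne_nil _ _ hcons.symm
      have h1n : i + 1 < n := by omega
      rw [PySem.List.pyRange_one_cons h1n]
      exact List.cons_ne_nil _ _
    rw [hpre0]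
    simp only [List.foldl_nil]
    rw [chainFold' (fun j => PySem.List.pyGetD angles j 0) _ hne]
    simp only [List.map_append, List.map_cons, List.sum_append, List.sum_cons,
      List.map_nil, List.sum_nil]
    congr 1
    ring
  · rw [chainFold' (fun j => PySem.List.pyGetD angles j 0) _ hpre0,
        chainFold (fun j => PySem.List.pyGetD angles j 0)]
    simp only [List.map_append, List.map_cons, List.sum_append, List.sum_cons]
    congr 1
    ring

-- the outer fold of a step that compares against a fixed non-negative c
lemma foldl_max_const (c : Int) : ∀ (M : List Int),
    M.foldl (fun result _ => if c > result then c else result) c = c := by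
  intro M
  induction M with
  | nil => rfl
  | cons x M ih => simpa using ih

lemma foldl_max_const0 (c : Int) (hc : 0 ≤ c) (M : List Int) (hM : M ≠ []) :
    M.foldl (fun result _ => if c > result then c else result) 0 = c := by
  cases M with
  | nil => exact absurd rfl hM
  | cons x M =>
    simp only [List.foldl_cons]
    by_cases h : c > 0
    · rw [if_pos h]; exact foldl_max_const c M
    · have : c = 0 := by omega
      subst this
      simp only [gt_iff_lt, lt_irrefl, if_false]
      exact foldl_max_const 0 M

-- sum over range 0 n of angles[j] is the sum of the first n elements
lemma map_getD_range_eq_take (xs : List Int) : ∀ (m : Nat), m ≤ xs.length →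
    (List.range m).map (fun k => xs.getD k 0) = xs.take m := by
  intro m hm
  apply List.ext_getElem
  · simp [hm]
  · intro k h1 h2
    simp at h1 ⊢
    have hk : k < xs.length := by omega
    simp [List.getElem?_eq_getElem hk]

lemma sum_range_eq_slice (angles : List Int) (n : Int) (h0 : 0 < n)
    (hn : n ≤ (angles.length : Int)) :
    ((PySem.List.pyRange 0 n 1).map (fun j => PySem.List.pyGetD angles j 0)).sum
      = (PySem.List.slice angles none (some n)).sum := by
  rw [PySem.List.slice_to angles (le_of_lt h0)]
  rw [PySem.List.pyRange_one 0 n, List.map_map]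
  have : ((fun j => PySem.List.pyGetD angles j 0) ∘ fun k : Nat => (0:Int) + ↑k)
      = fun k : Nat => angles.getD k 0 := by
    funext k
    simp [PySem.List.pyGetD_natCast]
  rw [this, map_getD_range_eq_take angles (n - 0).toNat (by omega)]
  norm_num

-- A evaluated at n = 1 (nonempty angles): max(angles[0], 0)
lemma a_at_one (angles : List Int) (_h : 1 ≤ (angles.length : Int)) :
    get_max_angle 1 angles
      = (if angles.getD 0 0 > 0 then angles.getD 0 0 else 0) := by
  unfold get_max_angle
  have h01 : PySem.List.pyRange 0 1 1 = [0] := by decide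
  rw [h01]
  simp [PySem.List.pyGetD_zero]

-- ===== VERDICT (by name: the statement is the Claim_ definition above) =====
theorem get_max_angle_spec : Claim_unchanged_get_max_angle := by
  intro n angles _ hpre hnd
  by_cases hn0 : n ≤ 0
  · -- empty range on both sides
    unfold get_max_angle get_max_angle_alt
    rw [PySem.List.pyRange_one_eq_nil (by omega), if_pos hn0]
    rfl
  · by_cases hn1 : n = 1
    · subst hn1
      rw [a_at_one angles hpre]
      unfold get_max_angle_alt
      rw [if_neg (show ¬(1:Int) ≤ 0 by norm_num), PySem.List.slice_to angles (by norm_num)]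
      have htake : (angles.take (1:Int).toNat).sum = angles.getD 0 0 := by
        cases angles with
        | nil => unfold Pre_get_max_angle at hpre; norm_num at hpre
        | cons x xs => simp
      rw [htake]
      unfold D_get_max_angle at hnd
      have hnd' : ¬(360 ≤ angles.getD 0 0 ∨
          (angles.getD 0 0 < 0 ∧ PySem.Int.mod (angles.getD 0 0) 360 ≠ 0)) :=
        fun hcontra => hnd ⟨rfl, hcontra⟩
      rw [not_or, not_and_or, not_not] at hnd'
      rw [PySem.Int.mod_eq_emod_of_pos (by norm_num)] at hnd' ⊢
      by_cases hpos : angles.getD 0 0 > 0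
      · rw [if_pos hpos]; omega
      · rw [if_neg hpos]; omega
    · -- 2 ≤ n
      have h2 : 2 ≤ n := by omega
      unfold get_max_angle get_max_angle_alt
      rw [if_neg hn0]
      set c := PySem.Int.mod
        (((PySem.List.pyRange 0 n 1).map (fun j => PySem.List.pyGetD angles j 0)).sum) 360 with hc
      have hstep : (PySem.List.pyRange 0 n 1).foldl
          (fun result i =>
            let angle := PySem.List.pyGetD angles i 0
            let temp :=
              (PySem.List.pyRange 0 n 1).foldl
                (fun temp j =>
                  if j = i then temp
                  else PySem.Int.mod (temp + PySem.List.pyGetD angles j 0) 360)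
                angle
            if temp > result then temp else result)
          0
          = (PySem.List.pyRange 0 n 1).foldl
              (fun result _ => if c > result then c else result) 0 := by
        apply PySem.List.foldl_congr_mem
        intro acc i hi
        have hm := PySem.List.mem_pyRange_one.mp hi
        simp only
        rw [inner_eq angles n i h2 hm.1 hm.2]
      rw [hstep]
      have hcnn : 0 ≤ c := by
        rw [hc]; exact PySem.Int.mod_nonneg _ (by norm_num)
      have hne : PySem.List.pyRange 0 n 1 ≠ [] := by
        rw [PySem.List.pyRange_one_cons (by omega : (0:Int) < n)]
        exact List.cons_ne_nil _ _
      rw [foldl_max_const0 c hcnn _ hne, hc,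
          sum_range_eq_slice angles n (by omega) hpre]

theorem get_max_angle_changed : Claim_changed_get_max_angle := by
  unfold Claim_changed_get_max_angle; decide

theorem get_max_angle_tight : Claim_exact_get_max_angle := by
  intro n angles _ hpre hd
  obtain ⟨hn1, hcase⟩ := hd
  subst hn1
  rw [a_at_one angles hpre]
  unfold get_max_angle_alt
  rw [if_neg (show ¬(1:Int) ≤ 0 by norm_num), PySem.List.slice_to angles (by norm_num)]
  have htake : (angles.take (1:Int).toNat).sum = angles.getD 0 0 := by
    cases angles with
    | nil => unfold Pre_get_max_angle at hpre; norm_num at hpre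
    | cons x xs => simp
  rw [htake]
  rw [PySem.Int.mod_eq_emod_of_pos (by norm_num)] at hcase ⊢
  rcases hcase with h | ⟨h1, h2⟩
  · rw [if_pos (by omega)]; omega
  · rw [if_neg (by omega)]; omega
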